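-- pv_equiv track=rewrite | github.com/ademokur/FaceFact | dlib_pointer_labeler.py | x_y_lister2
-- ===== SOURCE A (Python) =====
-- def x_y_lister2(x_y_list):
--     lst = []
--     mouth_l = []
--     right_eyebrow_l = []
--     left_eyebrow_l = []
--     right_eye_l = []
--     left_eye_l = []
--     nose_l = []
--     jaw_l = []
--     indexs = []
--     bfr = None
--     for (index, (name, (x, y))) in x_y_list:
--         if bfr == None:
--             bfr = index
--
--         if bfr != index:
--             bfr = index
--             indexs.append(mouth_l)
--             indexs.append(right_eyebrow_l)
--             indexs.append(left_eyebrow_l)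
--             indexs.append(right_eye_l)
--             indexs.append(left_eye_l)
--             indexs.append(nose_l)
--             indexs.append(jaw_l)
--             lst.append(indexs)
--
--             mouth_l = []
--             right_eyebrow_l = []
--             left_eyebrow_l = []
--             right_eye_l = []
--             left_eye_l = []
--             nose_l = []
--             jaw_l = []
--             indexs = []
--
--         if name == "mouth":
--             mouth_l.append((index, (x, y)))
--         if name == "right_eyebrow":
--             right_eyebrow_l.append((index, (x, y)))
--         if name == "left_eyebrow":
--             left_eyebrow_l.append((index, (x, y)))
--         if name == "right_eye":
--             right_eye_l.append((index, (x, y)))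
--         if name == "left_eye":
--             left_eye_l.append((index, (x, y)))
--         if name == "nose":
--             nose_l.append((index, (x, y)))
--         if name == "jaw":
--             jaw_l.append((index, (x, y)))
--
--
--     indexs.append(mouth_l)
--     indexs.append(right_eyebrow_l)
--     indexs.append(left_eyebrow_l)
--     indexs.append(right_eye_l)
--     indexs.append(left_eye_l)
--     indexs.append(nose_l)
--     indexs.append(jaw_l)
--     lst.append(indexs)
--
--     return lst
-- ===== SOURCE B (Python) =====
-- def x_y_lister2(x_y_list):
--     names = ["mouth", "right_eyebrow", "left_eyebrow", "right_eye",
--              "left_eye", "nose", "jaw"]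
--     # split into maximal consecutive runs of equal frame index
--     runs, cur = [], []
--     for e in x_y_list:
--         if cur and cur[0][0] != e[0]:
--             runs.append(cur)
--             cur = []
--         cur.append(e)
--     if cur:
--         runs.append(cur)
--     return [[[(idx, xy) for (idx, (n, xy)) in run if n == nm] for nm in names]
--             for run in runs]
-- ===== Notes on version B (the rewrite author's own statement) =====
-- stated objective: simpler
-- what changed: B first splits the input into maximal consecutive runs of equal frame index with a two-pointer scan and then builds each frame with one comprehension per feature name, replacing A's seven mutable bucket locals, the bfr sentinel and the manual flush/reset logic.
-- intended difference: On the empty input A returns one phantom frame of seven empty lists (an artefact of its unconditional final flush), while B returns the empty list, the intended grouping of zero landmark points. — e.g. on x_y_lister2([]): A returns [[[], [], [], [], [], [], []]], B returns []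
import Mathlib
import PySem

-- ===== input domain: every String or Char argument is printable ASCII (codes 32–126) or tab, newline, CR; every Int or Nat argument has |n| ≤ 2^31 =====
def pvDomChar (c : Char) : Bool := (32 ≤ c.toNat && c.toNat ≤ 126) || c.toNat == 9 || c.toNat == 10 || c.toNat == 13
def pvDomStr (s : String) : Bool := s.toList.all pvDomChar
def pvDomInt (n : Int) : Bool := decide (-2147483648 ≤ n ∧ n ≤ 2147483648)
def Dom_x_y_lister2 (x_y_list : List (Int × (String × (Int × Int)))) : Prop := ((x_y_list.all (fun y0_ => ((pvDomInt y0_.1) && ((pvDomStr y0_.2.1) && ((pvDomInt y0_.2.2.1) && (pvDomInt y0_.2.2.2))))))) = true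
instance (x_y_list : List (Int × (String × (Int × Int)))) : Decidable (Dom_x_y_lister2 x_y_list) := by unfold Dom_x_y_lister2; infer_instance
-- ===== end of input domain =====

-- B replaces A's seven bucket locals, bfr sentinel and manual flush by a run-splitting
-- scan followed by one filter per feature name (objective: simpler).

-- ===== PORT A =====
-- A's loop, transliterated as a recursion carrying exactly A's locals
-- (lst, the seven buckets, indexs, bfr) as state.
def xylAux : List (Int × (String × (Int × Int))) → List (List (List (Int × (Int × Int)))) →
    List (Int × (Int × Int)) → List (Int × (Int × Int)) → List (Int × (Int × Int)) →
    List (Int × (Int × Int)) → List (Int × (Int × Int)) → List (Int × (Int × Int)) →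
    List (Int × (Int × Int)) → List (List (Int × (Int × Int))) → Option Int →
    List (List (List (Int × (Int × Int))))
  | [], lst, m, reb, leb, re, le, no, ja, indexs, _bfr =>
      lst ++ [indexs ++ [m, reb, leb, re, le, no, ja]]
  | (index, (name, (x, y))) :: rest, lst, m, reb, leb, re, le, no, ja, indexs, bfr =>
      let bfr := if bfr = none then some index else bfr
      if bfr ≠ some index then
        -- flush current frame, reset the buckets, then the seven name tests
        let lst := lst ++ [indexs ++ [m, reb, leb, re, le, no, ja]]
        let m := if name = "mouth" then ([] : List (Int × (Int × Int))) ++ [(index, (x, y))] else []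
        let reb := if name = "right_eyebrow" then ([] : List (Int × (Int × Int))) ++ [(index, (x, y))] else []
        let leb := if name = "left_eyebrow" then ([] : List (Int × (Int × Int))) ++ [(index, (x, y))] else []
        let re := if name = "right_eye" then ([] : List (Int × (Int × Int))) ++ [(index, (x, y))] else []
        let le := if name = "left_eye" then ([] : List (Int × (Int × Int))) ++ [(index, (x, y))] else []
        let no := if name = "nose" then ([] : List (Int × (Int × Int))) ++ [(index, (x, y))] else []
        let ja := if name = "jaw" then ([] : List (Int × (Int × Int))) ++ [(index, (x, y))] else []
        xylAux rest lst m reb leb re le no ja [] (some index)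
      else
        let m := if name = "mouth" then m ++ [(index, (x, y))] else m
        let reb := if name = "right_eyebrow" then reb ++ [(index, (x, y))] else reb
        let leb := if name = "left_eyebrow" then leb ++ [(index, (x, y))] else leb
        let re := if name = "right_eye" then re ++ [(index, (x, y))] else re
        let le := if name = "left_eye" then le ++ [(index, (x, y))] else le
        let no := if name = "nose" then no ++ [(index, (x, y))] else no
        let ja := if name = "jaw" then ja ++ [(index, (x, y))] else ja
        xylAux rest lst m reb leb re le no ja indexs bfr

def x_y_lister2 (x_y_list : List (Int × (String × (Int × Int)))) : List (List (List (Int × (Int × Int)))) :=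
  xylAux x_y_list [] [] [] [] [] [] [] [] [] none

-- ===== PORT B =====
-- Source B's run-splitting loop: state (runs, cur); flush cur when the frame index changes
def runsAuxB : List (Int × (String × (Int × Int))) → List (List (Int × (String × (Int × Int)))) →
    List (Int × (String × (Int × Int))) → List (List (Int × (String × (Int × Int))))
  | [], runs, cur => if cur ≠ [] then runs ++ [cur] else runs
  | e :: rest, runs, cur =>
      if (match cur with | c :: _ => c.1 != e.1 | [] => false) then
        runsAuxB rest (runs ++ [cur]) ([] ++ [e])
      else
        runsAuxB rest runs (cur ++ [e])

def runsB (xs : List (Int × (String × (Int × Int)))) : List (List (Int × (String × (Int × Int)))) :=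
  runsAuxB xs [] []

def namesB : List String :=
  ["mouth", "right_eyebrow", "left_eyebrow", "right_eye", "left_eye", "nose", "jaw"]

def filtB (nm : String) (run : List (Int × (String × (Int × Int)))) : List (Int × (Int × Int)) :=
  run.filterMap (fun e => if e.2.1 = nm then some (e.1, e.2.2) else none)

def frameB (run : List (Int × (String × (Int × Int)))) : List (List (Int × (Int × Int))) :=
  namesB.map (fun nm => filtB nm run)

def x_y_lister2_alt (x_y_list : List (Int × (String × (Int × Int)))) : List (List (List (Int × (Int × Int)))) :=
  (runsB x_y_list).map frameB

-- ===== PRECONDITION & SPEC =====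
-- On the empty input A returns one phantom frame of seven empty lists (an artefact of its
-- unconditional final flush); B returns the empty list, the intended grouping of zero points.
def D_x_y_lister2 (x_y_list : List (Int × (String × (Int × Int)))) : Prop := x_y_list = []
instance (x_y_list : List (Int × (String × (Int × Int)))) : Decidable (D_x_y_lister2 x_y_list) := by unfold D_x_y_lister2; infer_instance

def Spec_x_y_lister2 (x_y_list : List (Int × (String × (Int × Int)))) (out : List (List (List (Int × (Int × Int))))) : Prop := ¬ D_x_y_lister2 x_y_list → out = x_y_lister2_alt x_y_list
instance (x_y_list : List (Int × (String × (Int × Int)))) (out : List (List (List (Int × (Int × Int))))) : Decidable (Spec_x_y_lister2 x_y_list out) := by unfold Spec_x_y_lister2; infer_instance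

def pvDiffWitness_x_y_lister2 : (List (Int × (String × (Int × Int)))) := []
def pvDiffWitnessOut_x_y_lister2 : (List (List (List (Int × (Int × Int))))) × (List (List (List (Int × (Int × Int))))) :=
  ([[[], [], [], [], [], [], []]], [])

-- ===== CLAIM (what is proved, stated in full; the proofs are below) =====
def Claim_unchanged_x_y_lister2 : Prop := ∀ (x_y_list : List (Int × (String × (Int × Int)))), Dom_x_y_lister2 x_y_list → Spec_x_y_lister2 x_y_list (x_y_lister2 x_y_list)
def Claim_changed_x_y_lister2 : Prop := Dom_x_y_lister2 (pvDiffWitness_x_y_lister2) ∧ D_x_y_lister2 (pvDiffWitness_x_y_lister2) ∧ x_y_lister2 (pvDiffWitness_x_y_lister2) = pvDiffWitnessOut_x_y_lister2.1 ∧ x_y_lister2_alt (pvDiffWitness_x_y_lister2) = pvDiffWitnessOut_x_y_lister2.2 ∧ pvDiffWitnessOut_x_y_lister2.1 ≠ pvDiffWitnessOut_x_y_lister2.2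
def Claim_exact_x_y_lister2 : Prop := ∀ (x_y_list : List (Int × (String × (Int × Int)))), Dom_x_y_lister2 x_y_list → D_x_y_lister2 x_y_list → x_y_lister2 x_y_list ≠ x_y_lister2_alt x_y_list

-- ===== LEMMAS AND PROOFS =====

-- proof-side specification of the run splitting (well-founded; used only in lemmas)
def runsSpec : List (Int × (String × (Int × Int))) → List (List (Int × (String × (Int × Int))))
  | [] => []
  | e :: rest =>
      (e :: rest.takeWhile (fun f => f.1 = e.1)) :: runsSpec (rest.dropWhile (fun f => f.1 = e.1))
termination_by xs => xs.length
decreasing_by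
  exact Nat.lt_succ_of_le (List.length_dropWhile_le _ _)

-- one frame still being filled: buckets m..ja already collected, run still to process
def frame8 (m reb leb re le no ja : List (Int × (Int × Int)))
    (run : List (Int × (String × (Int × Int)))) : List (List (Int × (Int × Int))) :=
  [m ++ filtB "mouth" run, reb ++ filtB "right_eyebrow" run, leb ++ filtB "left_eyebrow" run,
   re ++ filtB "right_eye" run, le ++ filtB "left_eye" run, no ++ filtB "nose" run,
   ja ++ filtB "jaw" run]

lemma bucket_cons (nm n : String) (i x y : Int) (b : List (Int × (Int × Int)))
    (t : List (Int × (String × (Int × Int)))) :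
    (if n = nm then b ++ [(i, (x, y))] else b) ++ filtB nm t
      = b ++ filtB nm ((i, (n, (x, y))) :: t) := by
  simp only [filtB, List.filterMap_cons]
  split_ifs <;> simp

lemma frame8_nil (run : List (Int × (String × (Int × Int)))) :
    frame8 [] [] [] [] [] [] [] run = frameB run := by
  simp [frame8, frameB, namesB]

lemma frame8_cons (m reb leb re le no ja : List (Int × (Int × Int))) (i x y : Int) (n : String)
    (t : List (Int × (String × (Int × Int)))) :
    frame8 (if n = "mouth" then m ++ [(i, (x, y))] else m)
      (if n = "right_eyebrow" then reb ++ [(i, (x, y))] else reb)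
      (if n = "left_eyebrow" then leb ++ [(i, (x, y))] else leb)
      (if n = "right_eye" then re ++ [(i, (x, y))] else re)
      (if n = "left_eye" then le ++ [(i, (x, y))] else le)
      (if n = "nose" then no ++ [(i, (x, y))] else no)
      (if n = "jaw" then ja ++ [(i, (x, y))] else ja) t
      = frame8 m reb leb re le no ja ((i, (n, (x, y))) :: t) := by
  simp only [frame8, bucket_cons]

lemma frame8_cons_nil (i x y : Int) (n : String) (t : List (Int × (String × (Int × Int)))) :
    frame8 (if n = "mouth" then [(i, (x, y))] else [])
      (if n = "right_eyebrow" then [(i, (x, y))] else [])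
      (if n = "left_eyebrow" then [(i, (x, y))] else [])
      (if n = "right_eye" then [(i, (x, y))] else [])
      (if n = "left_eye" then [(i, (x, y))] else [])
      (if n = "nose" then [(i, (x, y))] else [])
      (if n = "jaw" then [(i, (x, y))] else []) t
      = frameB ((i, (n, (x, y))) :: t) := by
  have h := frame8_cons [] [] [] [] [] [] [] i x y n t
  simp only [List.nil_append] at h
  rw [h, frame8_nil]

-- A's loop, related to the takeWhile/dropWhile picture of the runs
lemma xylAux_eq (xs : List (Int × (String × (Int × Int)))) :
    ∀ (k : Int) (lst : List (List (List (Int × (Int × Int)))))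
      (m reb leb re le no ja : List (Int × (Int × Int))),
    xylAux xs lst m reb leb re le no ja [] (some k)
      = lst ++ frame8 m reb leb re le no ja (xs.takeWhile (fun f => f.1 = k))
          :: (runsSpec (xs.dropWhile (fun f => f.1 = k))).map frameB := by
  induction xs with
  | nil =>
      intro k lst m reb leb re le no ja
      simp [xylAux, frame8, filtB, runsSpec]
  | cons e rest ih =>
      obtain ⟨i, n, x, y⟩ := e
      intro k lst m reb leb re le no ja
      by_cases h : i = k
      · subst h
        rw [show xylAux ((i, (n, (x, y))) :: rest) lst m reb leb re le no ja [] (some i)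
              = xylAux rest lst
                  (if n = "mouth" then m ++ [(i, (x, y))] else m)
                  (if n = "right_eyebrow" then reb ++ [(i, (x, y))] else reb)
                  (if n = "left_eyebrow" then leb ++ [(i, (x, y))] else leb)
                  (if n = "right_eye" then re ++ [(i, (x, y))] else re)
                  (if n = "left_eye" then le ++ [(i, (x, y))] else le)
                  (if n = "nose" then no ++ [(i, (x, y))] else no)
                  (if n = "jaw" then ja ++ [(i, (x, y))] else ja) [] (some i)
            from by simp [xylAux]]
        rw [ih]
        simp [frame8_cons]
      · rw [show xylAux ((i, (n, (x, y))) :: rest) lst m reb leb re le no ja [] (some k)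
              = xylAux rest (lst ++ [[m, reb, leb, re, le, no, ja]])
                  (if n = "mouth" then ([] : List (Int × (Int × Int))) ++ [(i, (x, y))] else [])
                  (if n = "right_eyebrow" then ([] : List (Int × (Int × Int))) ++ [(i, (x, y))] else [])
                  (if n = "left_eyebrow" then ([] : List (Int × (Int × Int))) ++ [(i, (x, y))] else [])
                  (if n = "right_eye" then ([] : List (Int × (Int × Int))) ++ [(i, (x, y))] else [])
                  (if n = "left_eye" then ([] : List (Int × (Int × Int))) ++ [(i, (x, y))] else [])
                  (if n = "nose" then ([] : List (Int × (Int × Int))) ++ [(i, (x, y))] else [])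
                  (if n = "jaw" then ([] : List (Int × (Int × Int))) ++ [(i, (x, y))] else []) [] (some i)
            from by simp [xylAux, Ne.symm h]]
        rw [ih]
        have htw : ((i, (n, (x, y))) :: rest).takeWhile (fun f => decide (f.1 = k)) = [] := by
          simp [List.takeWhile, h]
        have hdw : ((i, (n, (x, y))) :: rest).dropWhile (fun f => decide (f.1 = k))
            = (i, (n, (x, y))) :: rest := by
          simp [List.dropWhile, h]
        rw [htw, hdw, runsSpec]
        simp only [List.map_cons]
        rw [frame8_cons, frame8_nil]
        simp [frame8, filtB]

-- B's run-splitting loop, related to the same picture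
lemma runsAuxB_eq (xs : List (Int × (String × (Int × Int)))) :
    ∀ (runs : List (List (Int × (String × (Int × Int)))))
      (c : Int × (String × (Int × Int))) (cs : List (Int × (String × (Int × Int)))),
    runsAuxB xs runs (c :: cs)
      = runs ++ ((c :: cs) ++ xs.takeWhile (fun f => f.1 = c.1))
          :: runsSpec (xs.dropWhile (fun f => f.1 = c.1)) := by
  induction xs with
  | nil =>
      intro runs c cs
      simp [runsAuxB, runsSpec]
  | cons e rest ih =>
      intro runs c cs
      by_cases h : c.1 = e.1
      · rw [show runsAuxB (e :: rest) runs (c :: cs) = runsAuxB rest runs ((c :: cs) ++ [e])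
            from by simp [runsAuxB, h]]
        rw [show (c :: cs) ++ [e] = c :: (cs ++ [e]) from by simp]
        rw [ih]
        have htw : (e :: rest).takeWhile (fun f => decide (f.1 = c.1))
            = e :: rest.takeWhile (fun f => decide (f.1 = c.1)) := by
          simp [List.takeWhile, h.symm]
        have hdw : (e :: rest).dropWhile (fun f => decide (f.1 = c.1))
            = rest.dropWhile (fun f => decide (f.1 = c.1)) := by
          simp [List.dropWhile, h.symm]
        rw [htw, hdw]
        simp
      · rw [show runsAuxB (e :: rest) runs (c :: cs)
              = runsAuxB rest (runs ++ [c :: cs]) ([] ++ [e])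
            from by simp [runsAuxB, h]]
        rw [show ([] : List (Int × (String × (Int × Int)))) ++ [e] = e :: [] from by simp]
        rw [ih]
        have h' : ¬ e.1 = c.1 := fun hh => h hh.symm
        have htw : (e :: rest).takeWhile (fun f => decide (f.1 = c.1)) = [] := by
          simp [List.takeWhile, h']
        have hdw : (e :: rest).dropWhile (fun f => decide (f.1 = c.1)) = e :: rest := by
          simp [List.dropWhile, h']
        rw [htw, hdw, runsSpec]
        simp

lemma alt_eq_spec (xs : List (Int × (String × (Int × Int)))) :
    x_y_lister2_alt xs = (runsSpec xs).map frameB := by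
  cases xs with
  | nil => simp [x_y_lister2_alt, runsB, runsAuxB, runsSpec]
  | cons e rest =>
      rw [x_y_lister2_alt, runsB]
      rw [show runsAuxB (e :: rest) [] [] = runsAuxB rest [] ([] ++ [e])
          from by simp [runsAuxB]]
      rw [show ([] : List (Int × (String × (Int × Int)))) ++ [e] = e :: [] from by simp]
      rw [runsAuxB_eq, runsSpec]
      simp

-- ===== VERDICT (by name: the statement is the Claim_ definition above) =====
theorem x_y_lister2_spec : Claim_unchanged_x_y_lister2 := by
  intro xs _ hD
  show x_y_lister2 xs = x_y_lister2_alt xs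
  match xs, hD with
  | (i, (n, (x, y))) :: rest, _ =>
    rw [show x_y_lister2 ((i, (n, (x, y))) :: rest)
          = xylAux rest []
              (if n = "mouth" then ([] : List (Int × (Int × Int))) ++ [(i, (x, y))] else [])
              (if n = "right_eyebrow" then ([] : List (Int × (Int × Int))) ++ [(i, (x, y))] else [])
              (if n = "left_eyebrow" then ([] : List (Int × (Int × Int))) ++ [(i, (x, y))] else [])
              (if n = "right_eye" then ([] : List (Int × (Int × Int))) ++ [(i, (x, y))] else [])
              (if n = "left_eye" then ([] : List (Int × (Int × Int))) ++ [(i, (x, y))] else [])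
              (if n = "nose" then ([] : List (Int × (Int × Int))) ++ [(i, (x, y))] else [])
              (if n = "jaw" then ([] : List (Int × (Int × Int))) ++ [(i, (x, y))] else []) [] (some i)
        from by simp [x_y_lister2, xylAux]]
    rw [xylAux_eq, alt_eq_spec, runsSpec]
    simp only [List.map_cons, List.nil_append]
    rw [frame8_cons_nil]

theorem x_y_lister2_changed : Claim_changed_x_y_lister2 := by
  unfold Claim_changed_x_y_lister2; decide

theorem x_y_lister2_tight : Claim_exact_x_y_lister2 := by
  intro xs _ hD
  subst hD
  decide
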